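-- pv_equiv track=rewrite | github.com/yasincaliskan/MyLib | kelimefrekansi.py | sembolleriTemizle
-- ===== SOURCE A (Python) =====
-- def sembolleriTemizle(tumkelimeler):
--     sembolsuzkelimeler = []
--     semboller = "!'^+%&/()=?_-@\"*<>|[]{}.," + chr(775)
--     for kelime in tumkelimeler:
--         for sembol in semboller:
--             if sembol in kelime:
--                 kelime = kelime.replace(sembol,"")
--         if (len(kelime)>0):
--             sembolsuzkelimeler.append(kelime)
--     return sembolsuzkelimeler
-- ===== SOURCE B (Python) =====
-- def sembolleriTemizle(tumkelimeler):
--     semboller = set("!'^+%&/()=?_-@\"*<>|[]{}.," + chr(775))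
--     sembolsuzkelimeler = []
--     for kelime in tumkelimeler:
--         temiz = ''.join(c for c in kelime if c not in semboller)
--         if temiz:
--             sembolsuzkelimeler.append(temiz)
--     return sembolsuzkelimeler
-- ===== Notes on version B (the rewrite author's own statement) =====
-- stated objective: idiomatic
-- what changed: A runs 31 separate replace passes over each word (one per symbol, each rescanning the word); B builds the symbol set once and cleans each word in a single character-filtering pass.
import Mathlib
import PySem

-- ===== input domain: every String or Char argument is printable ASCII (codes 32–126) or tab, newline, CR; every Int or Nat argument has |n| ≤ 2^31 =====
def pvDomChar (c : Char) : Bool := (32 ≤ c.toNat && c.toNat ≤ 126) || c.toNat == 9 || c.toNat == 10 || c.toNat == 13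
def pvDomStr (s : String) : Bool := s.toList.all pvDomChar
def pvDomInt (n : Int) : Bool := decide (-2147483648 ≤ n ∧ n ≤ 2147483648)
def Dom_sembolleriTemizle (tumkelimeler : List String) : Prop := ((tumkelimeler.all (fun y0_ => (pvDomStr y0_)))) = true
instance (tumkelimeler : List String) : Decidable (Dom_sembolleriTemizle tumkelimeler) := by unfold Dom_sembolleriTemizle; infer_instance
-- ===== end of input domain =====

-- B replaces A's 31 per-symbol replace passes over each word with one character-filtering pass
-- against a symbol set built once (objective: idiomatic; same asymptotic cost).

-- ===== PORT A =====
def pvSemboller : String := "!'^+%&/()=?_-@\"*<>|[]{}.," ++ String.singleton (Char.ofNat 775)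

def sembolleriTemizle (tumkelimeler : List String) : List String :=
  tumkelimeler.foldl (fun sembolsuzkelimeler kelime0 =>
    let kelime := pvSemboller.toList.foldl (fun kelime sembol =>
      if PySem.Str.isIn (String.singleton sembol) kelime then
        PySem.Str.replace kelime (String.singleton sembol) ""
      else kelime) kelime0
    if PySem.Str.len kelime > 0 then sembolsuzkelimeler ++ [kelime] else sembolsuzkelimeler) []

-- ===== PORT B =====
def pvSembolSet : PySem.Set Char :=
  PySem.Set.ofList ("!'^+%&/()=?_-@\"*<>|[]{}.," ++ String.singleton (Char.ofNat 775)).toList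

def sembolleriTemizle_alt (tumkelimeler : List String) : List String :=
  tumkelimeler.foldl (fun sembolsuzkelimeler kelime =>
    let temiz := String.ofList (kelime.toList.filter (fun c => !(PySem.Set.contains pvSembolSet c)))
    if temiz ≠ "" then sembolsuzkelimeler ++ [temiz] else sembolsuzkelimeler) []

-- ===== PRECONDITION & SPEC =====
def Spec_sembolleriTemizle (tumkelimeler : List String) (out : List String) : Prop := out = sembolleriTemizle_alt tumkelimeler
instance (tumkelimeler : List String) (out : List String) : Decidable (Spec_sembolleriTemizle tumkelimeler out) := by unfold Spec_sembolleriTemizle; infer_instance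

-- ===== CLAIM (what is proved, stated in full; the proofs are below) =====
def Claim_equal_sembolleriTemizle : Prop := ∀ (tumkelimeler : List String), Dom_sembolleriTemizle tumkelimeler → Spec_sembolleriTemizle tumkelimeler (sembolleriTemizle tumkelimeler)

-- ===== LEMMAS AND PROOFS =====

-- replacing a single character by "" is filtering it out
theorem replace_go_single (c : Char) : ∀ (fuel : Nat) (l acc : List Char), l.length ≤ fuel →
    PySem.Chars.replace.go [c] [] fuel l acc = acc.reverse ++ l.filter (· ≠ c) := by
  intro fuel
  induction fuel with
  | zero =>
    intro l acc h
    have : l = [] := List.length_eq_zero_iff.mp (Nat.le_zero.mp h)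
    subst this; simp [PySem.Chars.replace.go]
  | succ n ih =>
    intro l acc h
    cases l with
    | nil => simp [PySem.Chars.replace.go]
    | cons a t =>
      by_cases hac : a = c
      · subst hac
        have hpre : List.isPrefixOf [a] (a :: t) = true := by
          simp [List.isPrefixOf]
        simp only [PySem.Chars.replace.go, hpre, if_pos, List.length_cons, List.length_nil,
          List.drop_succ_cons, List.drop_zero, List.reverse_nil, List.nil_append]
        rw [ih t acc (by simpa using Nat.lt_succ_iff.mp (by simpa using h))]
        simp
      · have hpre : List.isPrefixOf [c] (a :: t) = false := by
          simp [List.isPrefixOf]; intro h'; exact absurd h'.symm hac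
        simp only [PySem.Chars.replace.go, hpre]
        rw [if_neg (by simp)]
        rw [ih t (a :: acc) (by simpa using Nat.lt_succ_iff.mp (by simpa using h))]
        simp [hac]

theorem replace_single (k : List Char) (c : Char) :
    PySem.Chars.replace k [c] [] = k.filter (· ≠ c) := by
  rw [PySem.Chars.replace]
  simp only [List.isEmpty_cons]
  exact replace_go_single c k.length k [] le_rfl

theorem chars_isIn_singleton (c : Char) (l : List Char) :
    PySem.Chars.isIn [c] l = l.contains c := by
  rcases h : l.contains c with _ | _
  · rw [PySem.Chars.isIn_eq_false_iff]
    intro hinf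
    have : c ∈ l := hinf.subset (by simp)
    simp_all
  · rw [PySem.Chars.isIn_iff_infix]
    have hc : c ∈ l := by simpa using h
    obtain ⟨l₁, l₂, hl⟩ := List.append_of_mem hc
    exact ⟨l₁, l₂, by simp [hl]⟩

theorem isIn_singleton (c : Char) (s : String) :
    PySem.Str.isIn (String.singleton c) s = s.toList.contains c := by
  rw [PySem.Str.isIn_eq]
  have : (String.singleton c).toList = [c] := by simp
  rw [this, chars_isIn_singleton]

-- the per-word fold of single-char replaces equals one filter
theorem fold_replace_eq_filter : ∀ (syms : List Char) (s : String),
    (syms.foldl (fun kelime sembol =>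
      if PySem.Str.isIn (String.singleton sembol) kelime then
        PySem.Str.replace kelime (String.singleton sembol) ""
      else kelime) s).toList = s.toList.filter (fun ch => !syms.contains ch) := by
  intro syms
  induction syms with
  | nil => intro s; simp
  | cons c rest ih =>
    intro s
    simp only [List.foldl_cons]
    have hstep : (if PySem.Str.isIn (String.singleton c) s then
        PySem.Str.replace s (String.singleton c) "" else s).toList
        = s.toList.filter (· ≠ c) := by
      by_cases h : PySem.Str.isIn (String.singleton c) s = true
      · rw [if_pos h]
        rw [PySem.Str.toList_replace]
        simpa [String.singleton] using replace_single s.toList c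
      · rw [if_neg h]
        rw [isIn_singleton] at h
        have : c ∉ s.toList := by simpa using h
        rw [List.filter_eq_self.mpr]
        intro a ha
        simp only [ne_eq, decide_eq_true_eq]
        rintro rfl; exact this ha
    rw [ih, hstep, List.filter_filter]
    apply List.filter_congr
    intro a _
    simp only [List.contains_cons, Bool.not_or, Bool.and_comm, ne_eq]
    cases hb : (a == c) <;> simp_all

theorem perword_eq (s : String) :
    (pvSemboller.toList.foldl (fun kelime sembol =>
      if PySem.Str.isIn (String.singleton sembol) kelime then
        PySem.Str.replace kelime (String.singleton sembol) ""
      else kelime) s)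
    = String.ofList (s.toList.filter (fun c => !(PySem.Set.contains pvSembolSet c))) := by
  have hinj : ∀ (a b : String), a.toList = b.toList → a = b := by
    intro a b hab
    have := congrArg String.ofList hab
    simpa [String.ofList_toList] using this
  apply hinj
  rw [fold_replace_eq_filter, String.toList_ofList]
  apply List.filter_congr
  intro a _
  have : PySem.Set.contains pvSembolSet a = pvSemboller.toList.contains a := by
    rw [pvSembolSet, PySem.Set.contains_eq_listContains]
    rcases h : pvSemboller.toList.contains a with _ | _ <;>
      · simp only [List.contains_eq_mem, decide_eq_true_eq, decide_eq_false_iff_not] at h ⊢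
        simpa [PySem.Set.mem_ofList, pvSemboller] using h
  rw [this]

-- ===== VERDICT (by name: the statement is the Claim_ definition above) =====
theorem sembolleriTemizle_spec : Claim_equal_sembolleriTemizle := by
  intro tumkelimeler _
  unfold Spec_sembolleriTemizle sembolleriTemizle sembolleriTemizle_alt
  apply PySem.List.foldl_congr_mem
  intro acc kelime _
  simp only [perword_eq]
  have hiff : ∀ l : List Char, (String.ofList l = "") ↔ l = [] := by
    intro l
    constructor
    · intro hl
      have := congrArg String.toList hl
      simpa using this
    · rintro rfl; rfl
  by_cases h : (kelime.toList.filter (fun c => !(PySem.Set.contains pvSembolSet c))) = []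
  · rw [if_neg (by rw [PySem.Str.len_eq, String.toList_ofList, h]; simp),
        if_neg (by simp only [ne_eq, not_not]; exact (hiff _).mpr h)]
  · rw [if_pos (by rw [PySem.Str.len_eq, String.toList_ofList]; exact_mod_cast List.length_pos_iff.mpr h),
        if_pos (fun he => h ((hiff _).mp he))]
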